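-- pv_equiv track=rewrite | github.com/Mithzzx/CP-Solution-Vault | Leetcode/new.py | countPromotionalPeriods
-- ===== SOURCE A (Python) =====
-- def countPromotionalPeriods(orders):
--     n = len(orders)
--     if n < 3:
--         return 0
--
--     next_greater = [n] * n
--     stack = []
--     for i in range(n - 1, -1, -1):
--         while stack and orders[stack[-1]] < orders[i]:
--             stack.pop()
--         if stack:
--             next_greater[i] = stack[-1]
--         else:
--             next_greater[i] = n
--         stack.append(i)
--
--     prev_greater = [-1] * n
--     stack = []
--     for i in range(n):
--         while stack and orders[stack[-1]] < orders[i]: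
--             stack.pop()
--         if stack:
--             prev_greater[i] = stack[-1]
--         else:
--             prev_greater[i] = -1
--         stack.append(i)
--
--     events1 = []
--     for i in range(n):
--         events1.append((next_greater[i], i))
--     events1.sort(key=lambda x: x[0], reverse=True)
--
--     def fenw_add(fenw, index, size_n, delta):
--         idx = index + 1
--         while idx <= size_n:
--             fenw[idx] += delta
--             idx += idx & -idx
--
--     def fenw_prefix(fenw, index, size_n):
--         if index < 0:
--             return 0
--         total = 0
--         idx = index + 1
--         while idx > 0:
--             total += fenw[idx]
--             idx -= idx & -idx
--         return total
--
--     def fenw_range_query(fenw, l, r, size_n):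
--         if l > r:
--             return 0
--         return fenw_prefix(fenw, r, size_n) - fenw_prefix(fenw, l - 1, size_n)
--
--     size_fen = n
--     fenw1 = [0] * (size_fen + 1)
--     left_count = 0
--     ptr1 = 0
--     for j in range(n - 1, -1, -1):
--         while ptr1 < len(events1) and events1[ptr1][0] > j:
--             i_val = events1[ptr1][1]
--             fenw_add(fenw1, i_val, size_fen, 1)
--             ptr1 += 1
--         if j < 2:
--             continue
--         low_bound = prev_greater[j]
--         if low_bound == -1:
--             low_bound = 0
--         else:
--             low_bound = prev_greater[j]
--         high_bound = j - 2
--         if low_bound > high_bound: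
--             cnt = 0
--         else:
--             cnt = fenw_range_query(fenw1, low_bound, high_bound, size_fen)
--         left_count += cnt
--
--     events2 = []
--     for i in range(n):
--         events2.append((next_greater[i], i))
--     events2.sort(key=lambda x: x[0], reverse=True)
--
--     fenw2 = [0] * (size_fen + 1)
--     ptr2 = 0
--     right_count = 0
--     for j in range(n - 1, -1, -1):
--         while ptr2 < len(events2) and events2[ptr2][0] >= j:
--             i_val = events2[ptr2][1]
--             fenw_add(fenw2, i_val, size_fen, 1)
--             ptr2 += 1
--         if j < 2:
--             continue
--         low_bound = prev_greater[j] + 1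
--         high_bound = j - 2
--         if low_bound > high_bound:
--             cnt = 0
--         else:
--             cnt = fenw_range_query(fenw2, low_bound, high_bound, size_fen)
--         right_count += cnt
--
--     return left_count + right_count
-- ===== SOURCE B (Python) =====
-- def countPromotionalPeriods(orders):
--     n = len(orders)
--     if n < 3:
--         return 0
--
--     next_greater = [n] * n
--     stack = []
--     for i in range(n - 1, -1, -1):
--         while stack and orders[stack[-1]] < orders[i]:
--             stack.pop()
--         if stack:
--             next_greater[i] = stack[-1]
--         else:
--             next_greater[i] = n
--         stack.append(i)
--
--     prev_greater = [-1] * n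
--     stack = []
--     for i in range(n):
--         while stack and orders[stack[-1]] < orders[i]:
--             stack.pop()
--         if stack:
--             prev_greater[i] = stack[-1]
--         else:
--             prev_greater[i] = -1
--         stack.append(i)
--
--     total = 0
--     for j in range(2, n):
--         lo1 = prev_greater[j]
--         if lo1 < 0:
--             lo1 = 0
--         for i in range(lo1, j - 1):
--             if next_greater[i] > j:
--                 total += 1
--         for i in range(prev_greater[j] + 1, j - 1):
--             if next_greater[i] >= j:
--                 total += 1
--     return total
-- ===== Notes on version B (the rewrite author's own statement) =====
-- stated objective: simpler
-- what changed: B keeps the two monotonic-stack passes but replaces A's sorted event list, pointer sweeps and all Fenwick-tree helpers by two direct counting loops over the window [lo, j-2] for each j.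
import Mathlib
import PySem

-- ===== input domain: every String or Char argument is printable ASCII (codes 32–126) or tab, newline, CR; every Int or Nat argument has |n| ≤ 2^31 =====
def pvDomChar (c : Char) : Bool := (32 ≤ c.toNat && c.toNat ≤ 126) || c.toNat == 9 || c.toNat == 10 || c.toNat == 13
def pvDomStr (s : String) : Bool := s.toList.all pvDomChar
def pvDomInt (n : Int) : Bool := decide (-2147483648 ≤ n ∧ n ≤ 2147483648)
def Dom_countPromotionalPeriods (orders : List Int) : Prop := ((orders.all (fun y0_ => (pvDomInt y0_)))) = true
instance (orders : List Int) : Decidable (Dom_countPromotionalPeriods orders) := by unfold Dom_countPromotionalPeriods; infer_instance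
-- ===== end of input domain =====

-- B replaces A's sorted-events/Fenwick counting machinery with two direct counting
-- loops per index j (objective: simpler).  The two monotonic-stack passes are shared.

-- ===== PORT A =====
-- Python list used as a stack; the top of the stack is the HEAD of the Lean list.
-- `while stack and orders[stack[-1]] < orders[i]: stack.pop()`
def popSmaller (orders : List Int) (x : Int) : List Int → List Int
  | [] => []
  | t :: rest => if PySem.List.pyGetD orders t 0 < x then popSmaller orders x rest else t :: rest

-- one iteration of a monotonic-stack pass (`dflt` is the value used when the stack is
-- empty: `n` for next_greater, `-1` for prev_greater); stack indices are always valid,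
-- so the in-range read `orders[stack[-1]]` is exact via pyGetD.
def mstackStep (orders : List Int) (dflt : Int) (st : List Int × List Int) (i : Int) :
    List Int × List Int :=
  let stack := popSmaller orders (PySem.List.pyGetD orders i 0) st.2
  let v := match stack with | [] => dflt | t :: _ => t
  (st.1.set i.toNat v, i :: stack)

def nextGreaterList (orders : List Int) (n : Int) : List Int :=
  ((PySem.List.pyRange (n - 1) (-1) (-1)).foldl (mstackStep orders n)
    (List.replicate n.toNat n, [])).1

def prevGreaterList (orders : List Int) (n : Int) : List Int :=
  ((PySem.List.pyRange 0 n 1).foldl (mstackStep orders (-1))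
    (List.replicate n.toNat (-1), [])).1

-- `while idx <= size_n: fenw[idx] += delta; idx += idx & -idx` — the loop body runs at
-- most n times for idx ≥ 1 (idx strictly increases), so fuel (n+1).toNat is exact there;
-- A never calls it with idx < 1.
def fenwAddGo : Nat → List Int → Int → Int → Int → List Int
  | 0, fenw, _, _, _ => fenw
  | fuel + 1, fenw, idx, n, delta =>
    if idx ≤ n then
      fenwAddGo fuel (fenw.set idx.toNat (PySem.List.pyGetD fenw idx 0 + delta))
        (idx + PySem.Int.band idx (-idx)) n delta
    else fenw

def fenwAdd (fenw : List Int) (index n delta : Int) : List Int :=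
  fenwAddGo (n + 1).toNat fenw (index + 1) n delta

-- `while idx > 0: total += fenw[idx]; idx -= idx & -idx` — idx strictly decreases and
-- stays ≥ 0, so fuel (index+1).toNat is exact.
def fenwPrefixGo : Nat → List Int → Int → Int → Int
  | 0, _, _, total => total
  | fuel + 1, fenw, idx, total =>
    if 0 < idx then
      fenwPrefixGo fuel fenw (idx - PySem.Int.band idx (-idx))
        (total + PySem.List.pyGetD fenw idx 0)
    else total

-- (Python's fenw_prefix takes size_n but never uses it; the parameter is kept)
def fenwPrefix (fenw : List Int) (index _n : Int) : Int :=
  if index < 0 then 0 else fenwPrefixGo (index + 1).toNat fenw (index + 1) 0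

def fenwRange (fenw : List Int) (l r n : Int) : Int :=
  if l > r then 0 else fenwPrefix fenw r n - fenwPrefix fenw (l - 1) n

-- `events = []; for i in range(n): events.append((next_greater[i], i))`
def buildEvents (ng : List Int) (n : Int) : List (Int × Int) :=
  (PySem.List.pyRange 0 n 1).foldl (fun acc i => acc ++ [(PySem.List.pyGetD ng i 0, i)]) []

-- the inner `while ptr < len(events) and events[ptr][0] > j` (strict = true) resp.
-- `... >= j` (strict = false) loop of the two sweeps
def sweepWhile (events : List (Int × Int)) (strict : Bool) (j n : Int)
    (fenw : List Int) (ptr : Nat) : List Int × Nat :=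
  match he : events[ptr]? with
  | some e =>
    if (if strict then j < e.1 else j ≤ e.1) then
      sweepWhile events strict j n (fenwAdd fenw e.2 n 1) (ptr + 1)
    else (fenw, ptr)
  | none => (fenw, ptr)
termination_by events.length - ptr
decreasing_by
  have hlt : ptr < events.length := by
    rcases Nat.lt_or_ge ptr events.length with h | h
    · exact h
    · rw [List.getElem?_eq_none h] at he; cases he
  omega

-- one iteration of the first sweep (`for j in range(n-1,-1,-1)` body, left_count)
def sweep1Step (events : List (Int × Int)) (pg : List Int) (n : Int)
    (st : List Int × Nat × Int) (j : Int) : List Int × Nat × Int :=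
  let p := sweepWhile events true j n st.1 st.2.1
  if j < 2 then (p.1, p.2, st.2.2)
  else
    let lb := PySem.List.pyGetD pg j 0
    let low := if lb = -1 then 0 else lb
    let high := j - 2
    let cnt := if low > high then 0 else fenwRange p.1 low high n
    (p.1, p.2, st.2.2 + cnt)

-- one iteration of the second sweep (right_count)
def sweep2Step (events : List (Int × Int)) (pg : List Int) (n : Int)
    (st : List Int × Nat × Int) (j : Int) : List Int × Nat × Int :=
  let p := sweepWhile events false j n st.1 st.2.1
  if j < 2 then (p.1, p.2, st.2.2)
  else
    let low := PySem.List.pyGetD pg j 0 + 1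
    let high := j - 2
    let cnt := if low > high then 0 else fenwRange p.1 low high n
    (p.1, p.2, st.2.2 + cnt)

def countPromotionalPeriods (orders : List Int) : Int :=
  let n : Int := orders.length
  if n < 3 then 0
  else
    let ng := nextGreaterList orders n
    let pg := prevGreaterList orders n
    let events1 := PySem.List.sorted (buildEvents ng n) (fun e => e.1) true
    let left := ((PySem.List.pyRange (n - 1) (-1) (-1)).foldl (sweep1Step events1 pg n)
      (List.replicate (n + 1).toNat 0, 0, 0)).2.2
    let events2 := PySem.List.sorted (buildEvents ng n) (fun e => e.1) true
    let right := ((PySem.List.pyRange (n - 1) (-1) (-1)).foldl (sweep2Step events2 pg n)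
      (List.replicate (n + 1).toNat 0, 0, 0)).2.2
    left + right

-- ===== PORT B =====
-- same stack passes (identical Python code in Source B), then two direct counting loops
def countPromotionalPeriods_alt (orders : List Int) : Int :=
  let n : Int := orders.length
  if n < 3 then 0
  else
    let ng := nextGreaterList orders n
    let pg := prevGreaterList orders n
    (PySem.List.pyRange 2 n 1).foldl (fun total j =>
      let lb := PySem.List.pyGetD pg j 0
      let lo1 := if lb < 0 then 0 else lb
      let t1 := (PySem.List.pyRange lo1 (j - 1) 1).foldl
        (fun t i => if j < PySem.List.pyGetD ng i 0 then t + 1 else t) total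
      (PySem.List.pyRange (lb + 1) (j - 1) 1).foldl
        (fun t i => if j ≤ PySem.List.pyGetD ng i 0 then t + 1 else t) t1) 0

-- ===== PRECONDITION & SPEC =====
def Spec_countPromotionalPeriods (orders : List Int) (out : Int) : Prop := out = countPromotionalPeriods_alt orders
instance (orders : List Int) (out : Int) : Decidable (Spec_countPromotionalPeriods orders out) := by unfold Spec_countPromotionalPeriods; infer_instance

-- ===== CLAIM (what is proved, stated in full; the proofs are below) =====
def Claim_equal_countPromotionalPeriods : Prop := ∀ (orders : List Int), Dom_countPromotionalPeriods orders → Spec_countPromotionalPeriods orders (countPromotionalPeriods orders)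

-- ===== LEMMAS AND PROOFS =====

def lowN (x : Nat) : Nat := x - (x &&& (x - 1))

lemma band_pos_neg (x : Nat) (hx : 0 < x) : PySem.Int.band ↑x (-↑x) = ↑(lowN x) := by
  unfold PySem.Int.band lowN
  have h1 : ¬ (0 ≤ -(x:Int)) := by omega
  rw [if_pos (by positivity), if_neg h1]
  congr 1
  have : (-(-(x:Int)) - 1).toNat = x - 1 := by omega
  rw [this, Int.toNat_natCast]

lemma and_bit_ff_tt (m n : Nat) : (2*m) &&& (2*n+1) = 2*(m &&& n) := by
  have := Nat.bitwise_bit (f := fun a b => a && b) (a := false) (m := m) (b := true) (n := n)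
  simpa [Nat.bit, HAnd.hAnd, AndOp.and, Nat.land] using this

lemma and_bit_tt_ff (m n : Nat) : (2*m+1) &&& (2*n) = 2*(m &&& n) := by
  have := Nat.bitwise_bit (f := fun a b => a && b) (a := true) (m := m) (b := false) (n := n)
  simpa [Nat.bit, HAnd.hAnd, AndOp.and, Nat.land] using this

lemma lowN_odd (y : Nat) : lowN (2*y+1) = 1 := by
  unfold lowN
  have h : (2*y+1) - 1 = 2*y := by omega
  rw [h, and_bit_tt_ff]
  have : y &&& y = y := Nat.and_self y
  omega

lemma lowN_even (y : Nat) (hy : 0 < y) : lowN (2*y) = 2 * lowN y := by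
  unfold lowN
  have h : (2*y) - 1 = 2*(y-1)+1 := by omega
  rw [h, and_bit_ff_tt]
  have hle : y &&& (y-1) ≤ y := Nat.and_le_left
  omega

lemma lowN_pos (x : Nat) (hx : 0 < x) : 0 < lowN x := by
  induction x using Nat.strong_induction_on with
  | _ x ih =>
    rcases Nat.even_or_odd x with ⟨y, hy⟩ | ⟨y, hy⟩
    · subst hy
      have hy0 : 0 < y := by omega
      rw [show y + y = 2*y by ring, lowN_even y hy0]
      have := ih y (by omega) hy0
      omega
    · subst hy
      rw [lowN_odd]; omega

lemma lowN_le (x : Nat) : lowN x ≤ x := by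
  unfold lowN; omega

lemma lowN_pow (x : Nat) (hx : 0 < x) : ∃ t, lowN x = 2^t := by
  induction x using Nat.strong_induction_on with
  | _ x ih =>
    rcases Nat.even_or_odd x with ⟨y, hy⟩ | ⟨y, hy⟩
    · subst hy
      have hy0 : 0 < y := by omega
      obtain ⟨t, ht⟩ := ih y (by omega) hy0
      exact ⟨t+1, by rw [show y + y = 2*y by ring, lowN_even y hy0, ht]; ring⟩
    · subst hy
      exact ⟨0, by rw [show 2*y+1 = 2*y+1 from rfl, lowN_odd]; rfl⟩

lemma lowN_dvd_sub (x : Nat) (hx : 0 < x) : 2 * lowN x ∣ x - lowN x := by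
  induction x using Nat.strong_induction_on with
  | _ x ih =>
    rcases Nat.even_or_odd x with ⟨y, hy⟩ | ⟨y, hy⟩
    · subst hy
      have hy0 : 0 < y := by omega
      rw [show y + y = 2*y by ring, lowN_even y hy0]
      have hle := lowN_le y
      have h2 : 2*y - 2*lowN y = 2*(y - lowN y) := by omega
      rw [show y + y = 2*y by ring] at *
      rw [h2, show 2*(2*lowN y) = 2*(2*lowN y) from rfl]
      exact mul_dvd_mul_left 2 (ih y (by omega) hy0)
    · subst hy
      rw [lowN_odd]
      exact ⟨y, by omega⟩

lemma lowN_dvd_add (x : Nat) (hx : 0 < x) : 2 * lowN x ∣ x + lowN x := by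
  induction x using Nat.strong_induction_on with
  | _ x ih =>
    rcases Nat.even_or_odd x with ⟨y, hy⟩ | ⟨y, hy⟩
    · subst hy
      have hy0 : 0 < y := by omega
      rw [show y + y = 2*y by ring, lowN_even y hy0]
      have h2 : 2*y + 2*lowN y = 2*(y + lowN y) := by omega
      rw [h2]
      exact mul_dvd_mul_left 2 (ih y (by omega) hy0)
    · subst hy
      rw [lowN_odd]
      exact ⟨y+1, by omega⟩

lemma pow_dvd_lowN (s x : Nat) (hx : 0 < x) (h : 2^s ∣ x) : 2^s ∣ lowN x := by
  induction s generalizing x with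
  | zero => simpa using Nat.one_dvd _
  | succ s ih =>
    rcases Nat.even_or_odd x with ⟨y, hy⟩ | ⟨y, hy⟩
    · subst hy
      have hy0 : 0 < y := by omega
      rw [show y + y = 2*y by ring, lowN_even y hy0]
      have h2 : 2^s ∣ y := by
        obtain ⟨k, hk⟩ := h
        have hk' : y + y = 2*(2^s*k) := by rw [hk, pow_succ]; ring
        exact ⟨k, by omega⟩
      obtain ⟨k, hk⟩ := ih y hy0 h2
      refine ⟨k, ?_⟩
      rw [hk, pow_succ]; ring
    · subst hy
      have h2 : 2 ∣ 2*y+1 := dvd_trans ⟨2^s, by rw [pow_succ]; ring⟩ h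
      omega

lemma lowN_step (a : Nat) (ha : 0 < a) : 2 * lowN a ≤ lowN (a + lowN a) := by
  obtain ⟨t, ht⟩ := lowN_pow a ha
  have hdvd : 2^(t+1) ∣ a + lowN a := by
    rw [show (2:Nat)^(t+1) = 2 * lowN a from by rw [ht, pow_succ]; ring]
    exact lowN_dvd_add a ha
  have hpos : 0 < a + lowN a := by omega
  have := pow_dvd_lowN (t+1) _ hpos hdvd
  have hp := lowN_pos _ hpos
  calc 2 * lowN a = 2^(t+1) := by rw [ht, pow_succ]; ring
    _ ≤ lowN (a + lowN a) := Nat.le_of_dvd hp this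

lemma lowN_add (s : Nat) : ∀ c r : Nat, 2^s ∣ c → 0 < r → r < 2^s → lowN (c + r) = lowN r := by
  induction s with
  | zero => intro c r _ h1 h2; simp at h2; omega
  | succ s ih =>
    intro c r hc h1 h2
    have h2' : r < 2^s*2 := by rwa [pow_succ] at h2
    have hceven : 2 ∣ c := dvd_trans ⟨2^s, by rw [pow_succ]; ring⟩ hc
    obtain ⟨c', hc'⟩ := hceven
    rcases Nat.even_or_odd r with ⟨r', hr'⟩ | ⟨r', hr'⟩
    · have hr'0 : 0 < r' := by omega
      have h1' : c + r = 2*(c' + r') := by omega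
      have h2' : r = 2*r' := by omega
      rw [h1', h2', lowN_even _ (by omega), lowN_even _ hr'0]
      congr 1
      apply ih c' r' _ hr'0 (by omega)
      obtain ⟨k, hk⟩ := hc
      have hk' : c = 2*(2^s*k) := by rw [hk, pow_succ]; ring
      exact ⟨k, by omega⟩
    · have h1' : c + r = 2*(c' + r') + 1 := by omega
      have h2' : r = 2*r' + 1 := by omega
      rw [h1', h2', lowN_odd, lowN_odd]

lemma lowN_rnext (s : Nat) : ∀ r : Nat, 0 < r → r < 2^s → r + lowN r ≤ 2^s := by
  induction s with
  | zero => intro r h1 h2; simp at h2; omega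
  | succ s ih =>
    intro r h1 h2
    have h2' : r < 2^s*2 := by rwa [pow_succ] at h2
    rcases Nat.even_or_odd r with ⟨r', hr'⟩ | ⟨r', hr'⟩
    · have hr'0 : 0 < r' := by omega
      rw [show r = 2*r' by omega, lowN_even _ hr'0]
      have := ih r' hr'0 (by omega)
      rw [pow_succ]; omega
    · rw [show r = 2*r'+1 by omega, lowN_odd]
      omega

def upath (n : Nat) (a : Nat) : List Nat :=
  if h : 0 < a ∧ a ≤ n then a :: upath n (a + lowN a) else []
termination_by n + 1 - a
decreasing_by
  have := lowN_pos a h.1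
  omega

def dpath (c : Nat) : List Nat :=
  if h : 0 < c then c :: dpath (c - lowN c) else []
termination_by c
decreasing_by
  have := lowN_pos c h
  omega

lemma up_mem_bounds (n : Nat) : ∀ a b : Nat, b ∈ upath n a →
    a ≤ b ∧ b ≤ n ∧ b - lowN b ≤ a - lowN a := by
  intro a
  induction a using upath.induct n with
  | case1 a h ih =>
    intro b hb
    rw [upath, dif_pos h] at hb
    rcases List.mem_cons.mp hb with rfl | hb
    · omega
    · have hstep := lowN_step a h.1
      have hp := lowN_pos a h.1
      have hle := lowN_le a
      have hle' := lowN_le (a + lowN a)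
      have := ih b hb
      omega
  | case2 a h =>
    intro b hb
    rw [upath, dif_neg h] at hb
    cases hb

lemma dp_mem (c : Nat) : ∀ b ∈ dpath c, 0 < b ∧ b ≤ c := by
  induction c using Nat.strong_induction_on with
  | _ c ih =>
    intro b hb
    rw [dpath] at hb
    by_cases h : 0 < c
    · rw [dif_pos h] at hb
      rcases List.mem_cons.mp hb with rfl | hb
      · omega
      · have hlt : c - lowN c < c := by have := lowN_pos c h; omega
        have := ih _ hlt b hb
        omega
    · rw [dif_neg h] at hb; cases hb

lemma up_mem_char (n : Nat) : ∀ d a b : Nat, b - a ≤ d → 0 < a → a ≤ b → b ≤ n →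
    b - lowN b < a → b ∈ upath n a := by
  intro d
  induction d with
  | zero =>
    intro a b hd h1 h2 h3 h4
    have hab : a = b := by omega
    subst hab
    rw [upath, dif_pos ⟨h1, by omega⟩]
    exact List.mem_cons_self
  | succ d ih =>
    intro a b hd h1 h2 h3 h4
    by_cases hab : a = b
    · subst hab
      rw [upath, dif_pos ⟨h1, by omega⟩]
      exact List.mem_cons_self
    · have hlt : a < b := by omega
      have hbpos : 0 < b := by omega
      have hLpos := lowN_pos b hbpos
      have hLle := lowN_le b
      obtain ⟨t, ht⟩ := lowN_pow b hbpos
      -- r = a - (b - lowN b), 0 < r < lowN b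
      set c := b - lowN b with hc
      set r := a - c with hr
      have hr1 : 0 < r := by omega
      have hr2 : r < lowN b := by omega
      have hcr : a = c + r := by omega
      have hdvd : 2^(t+1) ∣ c := by
        rw [show (2:Nat)^(t+1) = 2 * lowN b from by rw [ht, pow_succ]; ring]
        exact lowN_dvd_sub b hbpos
      have hlowa : lowN a = lowN r := by
        rw [hcr]
        exact lowN_add (t+1) c r hdvd hr1 (by rw [pow_succ]; rw [ht] at hr2; omega)
      have hnext : a + lowN a ≤ b := by
        have hrn := lowN_rnext t r hr1 (by rw [← ht]; exact hr2)
        omega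
      have hapos := lowN_pos a (by omega)
      have hmem : b ∈ upath n (a + lowN a) := by
        apply ih (a + lowN a) b (by omega) (by omega) hnext h3
        omega
      rw [upath, dif_pos ⟨by omega, by omega⟩]
      exact List.mem_cons_of_mem a hmem

lemma up_not_mem_next (n a : Nat) (ha : 0 < a) : a ∉ upath n (a + lowN a) := by
  intro hmem
  have := up_mem_bounds n (a + lowN a) a hmem
  have := lowN_pos a ha
  omega

lemma dp_sum (a : Nat) (ha : 0 < a) : ∀ c : Nat,
    ((dpath c).map (fun b => if b - lowN b < a ∧ a ≤ b then (1 : Int) else 0)).sum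
      = if a ≤ c then 1 else 0 := by
  intro c
  induction c using Nat.strong_induction_on with
  | _ c ih =>
    rw [dpath]
    by_cases h : 0 < c
    · rw [dif_pos h]
      have hp := lowN_pos c h
      have hle := lowN_le c
      have hlt : c - lowN c < c := by omega
      simp only [List.map_cons, List.sum_cons]
      by_cases hhead : c - lowN c < a ∧ a ≤ c
      · rw [if_pos hhead]
        have htail : ((dpath (c - lowN c)).map
            (fun b => if b - lowN b < a ∧ a ≤ b then (1 : Int) else 0)).sum = 0 := by
          rw [ih _ hlt, if_neg (by omega)]
        rw [htail, if_pos (by omega)]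
        norm_num
      · rw [if_neg hhead]
        by_cases hac : a ≤ c
        · have h2 : a ≤ c - lowN c := by omega
          rw [ih _ hlt, if_pos h2, if_pos hac]
          norm_num
        · rw [ih _ hlt, if_neg (by omega), if_neg hac]
          norm_num
    · rw [dif_neg h]
      simp
      omega



lemma upath_eq_cons (n a : Nat) (h : 0 < a ∧ a ≤ n) :
    upath n a = a :: upath n (a + lowN a) := by rw [upath, dif_pos h]

lemma upath_eq_nil (n a : Nat) (h : ¬(0 < a ∧ a ≤ n)) : upath n a = [] := by
  rw [upath, dif_neg h]

lemma dpath_eq_cons (c : Nat) (h : 0 < c) : dpath c = c :: dpath (c - lowN c) := by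
  rw [dpath, dif_pos h]

lemma dpath_eq_nil (c : Nat) (h : ¬ 0 < c) : dpath c = [] := by
  rw [dpath, dif_neg h]

lemma getD_set_self (l : List Int) (a : Nat) (v : Int) (h : a < l.length) :
    (l.set a v).getD a 0 = v := by
  simp [List.getD_eq_getElem?_getD, h]

lemma getD_set_ne (l : List Int) (a b : Nat) (v : Int) (h : b ≠ a) :
    (l.set a v).getD b 0 = l.getD b 0 := by
  simp [List.getD_eq_getElem?_getD, List.getElem?_set_ne (by omega : a ≠ b)]

def dsum (fenw : List Int) (c : Nat) : Int :=
  ((dpath c).map (fun b => fenw.getD b 0)).sum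

lemma sum_map_split (l : List Nat) (f g : Nat → Int) :
    (l.map (fun b => f b + g b)).sum = (l.map f).sum + (l.map g).sum := by
  induction l with
  | nil => simp
  | cons x xs ih => simp [ih]; ring

lemma addGo_getD : ∀ (fuel : Nat) (a : Nat) (fenw : List Int) (b : Nat) (N : Nat) (δ : Int),
    0 < a → N + 1 ≤ fuel + a → fenw.length = N + 1 →
    (fenwAddGo fuel fenw ↑a ↑N δ).getD b 0 = fenw.getD b 0 + if b ∈ upath N a then δ else 0 := by
  intro fuel
  induction fuel with
  | zero =>
    intro a fenw b N δ ha hfuel hlen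
    rw [fenwAddGo, upath_eq_nil _ _ (by omega)]
    simp
  | succ fuel ih =>
    intro a fenw b N δ ha hfuel hlen
    rw [fenwAddGo]
    by_cases hle : (a : Int) ≤ ↑N
    · rw [if_pos hle]
      have haN : a ≤ N := by exact_mod_cast hle
      have hlow := lowN_pos a ha
      have hband : (a : Int) + PySem.Int.band ↑a (-↑a) = ↑(a + lowN a) := by
        rw [band_pos_neg a ha]; push_cast; ring
      rw [hband, PySem.List.pyGetD_natCast, Int.toNat_natCast]
      have hih := ih (a + lowN a) (fenw.set a (fenw.getD a 0 + δ)) b N δ (by omega) (by omega)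
        (by rw [List.length_set]; exact hlen)
      rw [hih]
      rw [upath_eq_cons N a ⟨ha, haN⟩]
      by_cases hb : b = a
      · subst hb
        rw [getD_set_self _ _ _ (by omega), if_neg (up_not_mem_next N b ha),
          if_pos List.mem_cons_self]
        ring
      · rw [getD_set_ne _ _ _ _ hb]
        congr 1
        by_cases hmem : b ∈ upath N (a + lowN a)
        · rw [if_pos hmem, if_pos (List.mem_cons_of_mem a hmem)]
        · rw [if_neg hmem, if_neg (by
            intro hc
            rcases List.mem_cons.mp hc with rfl | hc
            · exact hb rfl
            · exact hmem hc)]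
    · rw [if_neg hle, upath_eq_nil _ _ (by
        intro hc
        exact hle (by exact_mod_cast Nat.cast_le.mpr hc.2))]
      simp

lemma prefixGo_eq : ∀ (fuel c : Nat) (fenw : List Int) (total : Int), c ≤ fuel →
    fenwPrefixGo fuel fenw ↑c total = total + dsum fenw c := by
  intro fuel
  induction fuel with
  | zero =>
    intro c fenw total hc
    have : c = 0 := by omega
    subst this
    rw [fenwPrefixGo]
    rw [dsum, dpath_eq_nil 0 (by omega)]
    simp
  | succ fuel ih =>
    intro c fenw total hc
    rw [fenwPrefixGo]
    by_cases h : 0 < c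
    · rw [if_pos (by exact_mod_cast h)]
      have hlow := lowN_pos c h
      have hle := lowN_le c
      have hband : (c : Int) - PySem.Int.band ↑c (-↑c) = ↑(c - lowN c) := by
        rw [band_pos_neg c h]; push_cast [hle]; ring
      rw [hband, PySem.List.pyGetD_natCast, ih (c - lowN c) fenw _ (by omega)]
      rw [dsum, dsum, dpath_eq_cons c h]
      simp only [List.map_cons, List.sum_cons]
      ring
    · rw [if_neg (by omega)]
      have : c = 0 := by omega
      subst this
      rw [dsum, dpath_eq_nil 0 (by omega)]
      simp

lemma fenwPrefix_eq (fenw : List Int) (k n : Int) (h0 : 0 ≤ k) :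
    fenwPrefix fenw k n = dsum fenw (k + 1).toNat := by
  rw [fenwPrefix, if_neg (by omega)]
  set c := (k + 1).toNat with hcdef
  have hx : (k + 1 : Int) = ↑c := by omega
  rw [hx, prefixGo_eq _ _ _ _ (le_refl _)]
  ring

lemma mem_upath_iff (N a b : Nat) (ha : 0 < a) (hb : 0 < b) (hbN : b ≤ N) :
    b ∈ upath N a ↔ (b - lowN b < a ∧ a ≤ b) := by
  constructor
  · intro h
    have := up_mem_bounds N a b h
    have := lowN_pos a ha
    omega
  · intro h
    exact up_mem_char N (b - a) a b (by omega) ha h.2 hbN h.1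

lemma fenwAdd_dsum (N : Nat) (fenw : List Int) (hlen : fenw.length = N + 1)
    (m c : Nat) (hm : m < N) (hc : c ≤ N) :
    dsum (fenwAdd fenw ↑m ↑N 1) c = dsum fenw c + if m + 1 ≤ c then 1 else 0 := by
  rw [fenwAdd]
  have h1 : ((N : Int) + 1).toNat = N + 1 := by omega
  have h2 : ((m : Int) + 1) = ↑(m + 1) := by push_cast; ring
  rw [h1, h2]
  rw [dsum]
  rw [List.map_congr_left (fun b hb => addGo_getD (N + 1) (m + 1) fenw b N 1
    (by omega) (by omega) hlen)]
  rw [sum_map_split,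
    show ((dpath c).map (fun b => fenw.getD b 0)).sum = dsum fenw c from rfl]
  congr 1
  have hcongr : ∀ b ∈ dpath c,
      (if b ∈ upath N (m + 1) then (1 : Int) else 0)
        = (if b - lowN b < m + 1 ∧ m + 1 ≤ b then (1 : Int) else 0) := by
    intro b hb
    have hbb := dp_mem c b hb
    have hiff := mem_upath_iff N (m + 1) b (by omega) (by omega) (by omega)
    by_cases hmem : b ∈ upath N (m + 1)
    · rw [if_pos hmem, if_pos (hiff.mp hmem)]
    · rw [if_neg hmem, if_neg (fun hx => hmem (hiff.mpr hx))]
  rw [List.map_congr_left hcongr, dp_sum (m + 1) (by omega) c]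

lemma addGo_length : ∀ (fuel : Nat) (fenw : List Int) (idx n δ : Int),
    (fenwAddGo fuel fenw idx n δ).length = fenw.length := by
  intro fuel
  induction fuel with
  | zero => intro fenw idx n δ; rw [fenwAddGo]
  | succ fuel ih =>
    intro fenw idx n δ
    rw [fenwAddGo]
    by_cases h : idx ≤ n
    · rw [if_pos h, ih, List.length_set]
    · rw [if_neg h]

lemma dsum_zeros (L c : Nat) : dsum (List.replicate L 0) c = 0 := by
  rw [dsum]
  apply List.sum_eq_zero
  intro x hx
  obtain ⟨b, _, rfl⟩ := List.mem_map.mp hx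
  by_cases h : b < L
  · rw [List.getD_eq_getElem?_getD]
    simp [List.getElem?_replicate, h]
  · rw [List.getD_eq_default _ _ (by simpa [List.length_replicate] using h)]


def cmpb (strict : Bool) (j k : Int) : Bool :=
  if strict then decide (j < k) else decide (j ≤ k)

lemma cmpb_mono_j (strict : Bool) (j j' k : Int) (h : j' ≤ j) (hc : cmpb strict j k = true) :
    cmpb strict j' k = true := by
  cases strict <;> simp [cmpb] at hc ⊢ <;> omega

lemma cmpb_mono_k (strict : Bool) (j k k' : Int) (hc : cmpb strict j k = true) (h : k ≤ k') :
    cmpb strict j k' = true := by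
  cases strict <;> simp [cmpb] at hc ⊢ <;> omega

def FWinv (events : List (Int × Int)) (N : Nat) (fenw : List Int) (ptr : Nat) : Prop :=
  fenw.length = N + 1 ∧
    ∀ c : Nat, c ≤ N →
      dsum fenw c = ((events.take ptr).countP (fun e => decide (e.2 < (c : Int))) : Int)

lemma FWinv_add (events : List (Int × Int)) (N : Nat) (fenw : List Int) (ptr : Nat)
    (e : Int × Int) (he : events[ptr]? = some e) (hi1 : 0 ≤ e.2) (hi2 : e.2 < (N : Int))
    (h : FWinv events N fenw ptr) : FWinv events N (fenwAdd fenw e.2 ↑N 1) (ptr + 1) := by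
  obtain ⟨hlen, hds⟩ := h
  have hm : e.2 = ((e.2.toNat : Nat) : Int) := by omega
  constructor
  · rw [fenwAdd, addGo_length, hlen]
  · intro c hc
    rw [hm, fenwAdd_dsum N fenw hlen e.2.toNat c (by omega) hc]
    rw [List.take_succ, he]
    rw [List.countP_append, hds c hc]
    simp only [Option.toList_some, List.countP_cons, List.countP_nil]
    by_cases hlt : e.2 < (c : Int)
    · rw [if_pos (by omega)]
      simp [hlt]
    · rw [if_neg (by omega)]
      simp [hlt]

lemma sw_none (events : List (Int × Int)) (strict : Bool) (j n : Int) (fenw : List Int)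
    (ptr : Nat) (h : events[ptr]? = none) :
    sweepWhile events strict j n fenw ptr = (fenw, ptr) := by
  rw [sweepWhile]
  split <;> simp_all

lemma sw_step (events : List (Int × Int)) (strict : Bool) (j n : Int) (fenw : List Int)
    (ptr : Nat) (e : Int × Int) (h : events[ptr]? = some e)
    (hc : (if strict then j < e.1 else j ≤ e.1)) :
    sweepWhile events strict j n fenw ptr
      = sweepWhile events strict j n (fenwAdd fenw e.2 n 1) (ptr + 1) := by
  rw [sweepWhile]
  split <;> simp_all

lemma sw_stop (events : List (Int × Int)) (strict : Bool) (j n : Int) (fenw : List Int)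
    (ptr : Nat) (e : Int × Int) (h : events[ptr]? = some e)
    (hc : ¬ (if strict then j < e.1 else j ≤ e.1)) :
    sweepWhile events strict j n fenw ptr = (fenw, ptr) := by
  rw [sweepWhile]
  split <;> simp_all

-- result of the inner while loop: it advances `ptr` exactly over the events whose key
-- still satisfies the comparison, and preserves the Fenwick invariant
lemma sweepWhile_spec (events : List (Int × Int)) (strict : Bool) (j : Int) (N : Nat)
    (hidx : ∀ e ∈ events, 0 ≤ e.2 ∧ e.2 < (N : Int))
    (hsort : List.Pairwise (fun a b => b.1 ≤ a.1) events) :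
    ∀ (d ptr : Nat) (fenw : List Int), events.length - ptr ≤ d → ptr ≤ events.length →
    (∀ e ∈ events.take ptr, cmpb strict j e.1 = true) →
    FWinv events N fenw ptr →
    (sweepWhile events strict j ↑N fenw ptr).2 ≤ events.length ∧
    (∀ e ∈ events.take (sweepWhile events strict j ↑N fenw ptr).2, cmpb strict j e.1 = true) ∧
    (∀ e ∈ events.drop (sweepWhile events strict j ↑N fenw ptr).2, cmpb strict j e.1 = false) ∧
    FWinv events N (sweepWhile events strict j ↑N fenw ptr).1
      (sweepWhile events strict j ↑N fenw ptr).2 := by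
  intro d
  induction d with
  | zero =>
    intro ptr fenw hd hle htake hfw
    have hnone : events[ptr]? = none := by
      rw [List.getElem?_eq_none]; omega
    rw [sw_none _ _ _ _ _ _ hnone]
    refine ⟨by omega, by simpa using htake, ?_, hfw⟩
    intro e he
    rw [List.drop_eq_nil_of_le (by omega)] at he
    cases he
  | succ d ih =>
    intro ptr fenw hd hle htake hfw
    rcases hE : events[ptr]? with _ | e
    · have hptr : ptr = events.length := by
        have := List.getElem?_eq_none_iff.mp hE; omega
      rw [sw_none _ _ _ _ _ _ hE]
      refine ⟨by omega, htake, ?_, hfw⟩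
      intro e hee
      rw [List.drop_eq_nil_of_le (by omega)] at hee
      cases hee
    · have hptrlt : ptr < events.length := (List.getElem?_eq_some_iff.mp hE).1
      have hmem : e ∈ events := by
        obtain ⟨h1, h2⟩ := List.getElem?_eq_some_iff.mp hE
        exact h2 ▸ List.getElem_mem h1
      by_cases hcond : (if strict then j < e.1 else j ≤ e.1)
      · rw [sw_step _ _ _ _ _ _ e hE hcond]
        have hcmpb : cmpb strict j e.1 = true := by
          cases strict <;> simp [cmpb] at hcond ⊢ <;> omega
        have htake' : ∀ e' ∈ events.take (ptr + 1), cmpb strict j e'.1 = true := by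
          intro e' he'
          rw [List.take_succ, hE] at he'
          rcases List.mem_append.mp he' with h | h
          · exact htake e' h
          · simp at h; subst h; exact hcmpb
        have hfw' := FWinv_add events N fenw ptr e hE (hidx e hmem).1 (hidx e hmem).2 hfw
        exact ih (ptr + 1) _ (by omega) (by omega) htake' hfw'
      · rw [sw_stop _ _ _ _ _ _ e hE hcond]
        have hcmpb : cmpb strict j e.1 = false := by
          cases strict <;> simp [cmpb] at hcond ⊢ <;> omega
        refine ⟨by omega, htake, ?_, hfw⟩
        intro e' he'
        have hgete : events[ptr] = e := (List.getElem?_eq_some_iff.mp hE).2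
        rw [List.drop_eq_getElem_cons hptrlt] at he'
        rcases List.mem_cons.mp he' with rfl | h
        · rw [hgete]; exact hcmpb
        · have hpd : List.Pairwise (fun a b => b.1 ≤ a.1) (events.drop ptr) :=
            hsort.sublist (List.drop_sublist ptr events)
          rw [List.drop_eq_getElem_cons hptrlt, hgete] at hpd
          have hle' : e'.1 ≤ e.1 := (List.pairwise_cons.mp hpd).1 e' h
          cases hc : cmpb strict j e'.1
          · rfl
          · exact absurd (cmpb_mono_k strict j e'.1 e.1 hc hle') (by rw [hcmpb]; simp)


def genStep (events : List (Int × Int)) (strict : Bool) (lof : Int → Int) (n : Int)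
    (st : List Int × Nat × Int) (j : Int) : List Int × Nat × Int :=
  let p := sweepWhile events strict j n st.1 st.2.1
  if j < 2 then (p.1, p.2, st.2.2)
  else
    let low := lof j
    let high := j - 2
    let cnt := if low > high then 0 else fenwRange p.1 low high n
    (p.1, p.2, st.2.2 + cnt)

lemma sweep1Step_eq (events : List (Int × Int)) (pg : List Int) (n : Int) :
    sweep1Step events pg n = genStep events true
      (fun j => if PySem.List.pyGetD pg j 0 = -1 then 0 else PySem.List.pyGetD pg j 0) n := by
  funext st j
  rfl

lemma sweep2Step_eq (events : List (Int × Int)) (pg : List Int) (n : Int) :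
    sweep2Step events pg n = genStep events false
      (fun j => PySem.List.pyGetD pg j 0 + 1) n := by
  funext st j
  rfl

def countPW (events : List (Int × Int)) (strict : Bool) (lof : Int → Int) (j : Int) : Int :=
  (events.countP (fun e =>
    cmpb strict j e.1 && (decide (lof j ≤ e.2) && decide (e.2 ≤ j - 2))) : Int)

lemma countP_window_sub (l : List (Int × Int)) (lo hi : Int) (hlohi : lo ≤ hi + 1) :
    (l.countP (fun e => decide (e.2 ≤ hi)) : Int) - (l.countP (fun e => decide (e.2 < lo)) : Int)
      = (l.countP (fun e => decide (lo ≤ e.2) && decide (e.2 ≤ hi)) : Int) := by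
  induction l with
  | nil => simp
  | cons e l ih =>
    simp only [List.countP_cons]
    by_cases h1 : e.2 ≤ hi <;> by_cases h2 : e.2 < lo
    all_goals first
      | (have h3 : lo ≤ e.2 := by omega
         simp only [h1, h2, h3, decide_true, decide_false, Bool.true_and, Bool.false_and,
           Bool.and_true, Bool.and_false, if_true, if_false]
         push_cast
         omega)
      | (have h3 : ¬ lo ≤ e.2 := by omega
         simp only [h1, h2, h3, decide_true, decide_false, Bool.true_and, Bool.false_and,
           Bool.and_true, Bool.and_false, if_true, if_false]
         push_cast
         omega)

-- value of A's range query once the while loop has processed exactly the events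
-- whose key compares true against j
lemma query_eq_countPW (events : List (Int × Int)) (strict : Bool) (lof : Int → Int)
    (N : Nat) (fenw : List Int) (ptr : Nat) (j : Int)
    (hidx : ∀ e ∈ events, 0 ≤ e.2 ∧ e.2 < (N : Int))
    (h2j : 2 ≤ j) (hjN : j ≤ (N : Int) - 1) (hlo : 0 ≤ lof j)
    (hptr : ptr ≤ events.length)
    (htake : ∀ e ∈ events.take ptr, cmpb strict j e.1 = true)
    (hdrop : ∀ e ∈ events.drop ptr, cmpb strict j e.1 = false)
    (hfw : FWinv events N fenw ptr) :
    (if lof j > j - 2 then 0 else fenwRange fenw (lof j) (j - 2) ↑N)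
      = countPW events strict lof j := by
  obtain ⟨hlen, hds⟩ := hfw
  have hcnt_take : ∀ (p : Int × Int → Bool),
      (events.countP (fun e => cmpb strict j e.1 && p e) : Int)
        = ((events.take ptr).countP p : Int) := by
    intro p
    conv_lhs => rw [← List.take_append_drop ptr events]
    rw [List.countP_append]
    have h1 : (events.take ptr).countP (fun e => cmpb strict j e.1 && p e)
        = (events.take ptr).countP p :=
      List.countP_congr (fun e he => by rw [htake e he]; simp)
    have h2 : (events.drop ptr).countP (fun e => cmpb strict j e.1 && p e) = 0 :=
      List.countP_eq_zero.mpr (fun e he => by rw [hdrop e he]; simp)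
    rw [h1, h2]
    push_cast
    ring
  rw [countPW]
  by_cases hwin : lof j > j - 2
  · rw [if_pos hwin]
    have : events.countP (fun e =>
        cmpb strict j e.1 && (decide (lof j ≤ e.2) && decide (e.2 ≤ j - 2))) = 0 :=
      List.countP_eq_zero.mpr (fun e he => by
        by_cases ha : lof j ≤ e.2 <;> by_cases hb : e.2 ≤ j - 2 <;>
          simp [ha, hb] <;> omega)
    rw [this]
    simp
  · rw [if_neg hwin, fenwRange, if_neg hwin]
    push_neg at hwin
    -- prefix at hi = j - 2
    have hhi : fenwPrefix fenw (j - 2) ↑N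
        = ((events.take ptr).countP (fun e => decide (e.2 ≤ j - 2)) : Int) := by
      rw [fenwPrefix_eq fenw (j - 2) ↑N (by omega)]
      rw [hds (j - 2 + 1).toNat (by omega)]
      congr 1
      apply List.countP_congr
      intro e he
      have : ((j - 2 + 1).toNat : Int) = j - 1 := by omega
      rw [this]
      constructor <;> intro h <;> simp at h ⊢ <;> omega
    -- prefix at lof j - 1
    have hlo1 : fenwPrefix fenw (lof j - 1) ↑N
        = ((events.take ptr).countP (fun e => decide (e.2 < lof j)) : Int) := by
      by_cases hz : lof j = 0
      · rw [hz, fenwPrefix, if_pos (by omega)]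
        have : (events.take ptr).countP (fun e => decide (e.2 < 0)) = 0 :=
          List.countP_eq_zero.mpr (fun e he => by
            have := (hidx e (List.mem_of_mem_take he)).1
            simp
            omega)
        rw [this]
        simp
      · rw [fenwPrefix_eq fenw (lof j - 1) ↑N (by omega)]
        rw [hds (lof j - 1 + 1).toNat (by omega)]
        congr 1
        apply List.countP_congr
        intro e he
        have : ((lof j - 1 + 1).toNat : Int) = lof j := by omega
        rw [this]
      
    rw [hhi, hlo1, countP_window_sub _ _ _ (by omega)]
    rw [hcnt_take (fun e => decide (lof j ≤ e.2) && decide (e.2 ≤ j - 2))]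


-- the descending loop `for j in range(n-1,-1,-1)` as a mapped range
lemma pyRange_desc (M : Nat) :
    PySem.List.pyRange (↑M - 1) (-1) (-1) = (List.range M).map (fun k => (↑M - 1 - ↑k : Int)) := by
  rw [PySem.List.pyRange_of_neg _ _ (by norm_num)]
  rcases Nat.eq_zero_or_pos M with hM | hM
  · subst hM; norm_num
  · rw [if_pos (by push_cast; omega)]
    have hc : ((↑M - 1 - -1 + - -1 - 1) / - -1 : Int).toNat = M := by
      norm_num
    rw [hc]
    apply List.map_congr_left
    intro k hk
    ring

lemma desc_cons (M : Nat) :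
    (List.range (M + 1)).map (fun k => (↑(M + 1) - 1 - ↑k : Int))
      = (↑M : Int) :: (List.range M).map (fun k => (↑M - 1 - ↑k : Int)) := by
  rw [List.range_succ_eq_map]
  simp only [List.map_cons, List.map_map, Function.comp]
  congr 1
  · push_cast; ring
  · apply List.map_congr_left
    intro k hk
    simp only [Function.comp_apply]
    push_cast
    ring

lemma sweepFold (events : List (Int × Int)) (strict : Bool) (lof : Int → Int) (N : Nat)
    (hidx : ∀ e ∈ events, 0 ≤ e.2 ∧ e.2 < (N : Int))
    (hsort : List.Pairwise (fun a b => b.1 ≤ a.1) events)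
    (hlo : ∀ j : Int, 2 ≤ j → 0 ≤ lof j) :
    ∀ (M : Nat) (fenw : List Int) (ptr : Nat) (acc : Int),
    M ≤ N →
    ptr ≤ events.length →
    (∀ e ∈ events.take ptr, cmpb strict (↑M - 1) e.1 = true) →
    FWinv events N fenw ptr →
    (((List.range M).map (fun k => (↑M - 1 - ↑k : Int))).foldl
        (genStep events strict lof ↑N) (fenw, ptr, acc)).2.2
      = acc + (((List.range M).map (fun k => (↑M - 1 - ↑k : Int))).map
          (fun j => if 2 ≤ j then countPW events strict lof j else 0)).sum := by
  intro M
  induction M with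
  | zero =>
    intro fenw ptr acc _ _ _ _
    simp
  | succ M ih =>
    intro fenw ptr acc hMN hptr htake hfw
    rw [desc_cons]
    simp only [List.foldl_cons, List.map_cons, List.sum_cons]
    have hMcast : ((M + 1 : Nat) : Int) - 1 = (M : Int) := by push_cast; ring
    rw [hMcast] at htake
    have hws := sweepWhile_spec events strict (↑M) N hidx hsort
      (events.length - ptr) ptr fenw (le_refl _) hptr htake hfw
    obtain ⟨hp1, hp2, hp3, hp4⟩ := hws
    have hstep : genStep events strict lof ↑N (fenw, ptr, acc) (↑M)
        = ((sweepWhile events strict (↑M) ↑N fenw ptr).1,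
           (sweepWhile events strict (↑M) ↑N fenw ptr).2,
           acc + (if 2 ≤ (M : Int) then countPW events strict lof ↑M else 0)) := by
      simp only [genStep]
      by_cases hM2 : (M : Int) < 2
      · rw [if_pos hM2, if_neg (by omega)]
        simp
      · have hq := query_eq_countPW events strict lof N
          (sweepWhile events strict (↑M) ↑N fenw ptr).1
          (sweepWhile events strict (↑M) ↑N fenw ptr).2 (↑M) hidx (by omega)
          (by push_cast; omega) (hlo _ (by omega)) hp1 hp2 hp3 hp4
        rw [if_neg hM2, if_pos (show (2:Int) ≤ (M:Int) by omega), ← hq]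
    rw [hstep]
    rw [ih (sweepWhile events strict (↑M) ↑N fenw ptr).1
      (sweepWhile events strict (↑M) ↑N fenw ptr).2 _ (by omega) hp1
      (fun e he => cmpb_mono_j strict (↑M) (↑M - 1) e.1 (by omega) (hp2 e he)) hp4]
    ring


lemma popSmaller_subset (orders : List Int) (x : Int) :
    ∀ (s : List Int) (v : Int), v ∈ popSmaller orders x s → v ∈ s := by
  intro s
  induction s with
  | nil => intro v hv; rw [popSmaller] at hv; cases hv
  | cons t rest ih =>
    intro v hv
    rw [popSmaller] at hv
    by_cases h : PySem.List.pyGetD orders t 0 < x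
    · rw [if_pos h] at hv
      exact List.mem_cons_of_mem t (ih v hv)
    · rw [if_neg h] at hv
      exact hv

-- all prev_greater entries stay ≥ -1 along the pass
lemma mstack_inv (orders : List Int) (d : Int) (hd : -1 ≤ d) :
    ∀ (l : List Int), (∀ i ∈ l, 0 ≤ i) → ∀ (st : List Int × List Int),
    (∀ v ∈ st.1, -1 ≤ v) → (∀ v ∈ st.2, 0 ≤ v) →
    (∀ v ∈ (l.foldl (mstackStep orders d) st).1, -1 ≤ v)
      ∧ (∀ v ∈ (l.foldl (mstackStep orders d) st).2, 0 ≤ v) := by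
  intro l
  induction l with
  | nil => intro _ st h1 h2; exact ⟨h1, h2⟩
  | cons i rest ih =>
    intro hl st h1 h2
    rw [List.foldl_cons]
    have hi : 0 ≤ i := hl i List.mem_cons_self
    have hrest : ∀ i' ∈ rest, 0 ≤ i' := fun i' hi' => hl i' (List.mem_cons_of_mem i hi')
    apply ih hrest
    · -- entries of the updated array
      intro v hv
      rcases List.mem_or_eq_of_mem_set hv with hv' | rfl
      · exact h1 v hv'
      · -- the written value is d or a stack element
        rcases hst : popSmaller orders (PySem.List.pyGetD orders i 0) st.2 with _ | ⟨t, _⟩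
        · simp only [mstackStep, hst]; exact hd
        · simp only [mstackStep, hst]
          have ht : t ∈ st.2 := popSmaller_subset orders _ st.2 t (hst ▸ List.mem_cons_self)
          have := h2 t ht
          omega
    · -- stack elements stay nonnegative
      intro v hv
      simp only [mstackStep] at hv
      rcases List.mem_cons.mp hv with rfl | hv'
      · exact hi
      · exact h2 v (popSmaller_subset orders _ st.2 v hv')

-- pyGetD returns an element of the list or the default
lemma pyGetD_mem_or_default (xs : List Int) (i : Int) (d : Int) :
    PySem.List.pyGetD xs i d ∈ xs ∨ PySem.List.pyGetD xs i d = d := by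
  rw [PySem.List.pyGetD]
  rcases h : PySem.List.pyGet? xs i with _ | v
  · right; rfl
  · left
    rw [PySem.List.pyGet?] at h
    rcases hk : PySem.List.pyIdx? xs.length i with _ | k
    · rw [hk] at h; cases h
    · rw [hk] at h
      simp only [Option.bind_some] at h
      exact List.mem_of_getElem? h

lemma prevGreater_ge (orders : List Int) (n j : Int) :
    -1 ≤ PySem.List.pyGetD (prevGreaterList orders n) j 0 := by
  have hentries : ∀ v ∈ prevGreaterList orders n, -1 ≤ v := by
    rw [prevGreaterList]
    intro v hv
    have hl : ∀ i ∈ PySem.List.pyRange 0 n 1, (0:Int) ≤ i := by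
      intro i hi
      exact (PySem.List.mem_pyRange_one.mp hi).1
    have hinit1 : ∀ v ∈ List.replicate n.toNat (-1 : Int), -1 ≤ v := by
      intro v hv
      rw [List.eq_of_mem_replicate hv]
    have hinit2 : ∀ v ∈ ([] : List Int), (0:Int) ≤ v := by intro v hv; cases hv
    exact (mstack_inv orders (-1) (by omega) _ hl _ hinit1 hinit2).1 v hv
  rcases pyGetD_mem_or_default (prevGreaterList orders n) j 0 with h | h
  · exact hentries _ h
  · omega


lemma pyRange_nil (a b : Int) (h : b ≤ a) : PySem.List.pyRange a b 1 = [] := by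
  rw [PySem.List.pyRange_of_pos _ _ (by norm_num), if_neg (by omega)]
  simp

lemma countP_range_window (q : Int → Bool) (lo hi n : Int) (hlo : 0 ≤ lo) (hhi : hi < n) :
    (PySem.List.pyRange 0 n 1).countP (fun i => q i && (decide (lo ≤ i) && decide (i ≤ hi)))
      = (PySem.List.pyRange lo (hi + 1) 1).countP q := by
  by_cases hwin : hi < lo
  · rw [pyRange_nil lo (hi + 1) (by omega), List.countP_nil]
    apply List.countP_eq_zero.mpr
    intro i _
    by_cases h1 : lo ≤ i <;> by_cases h2 : i ≤ hi <;> simp [h1, h2] <;> omega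
  · push_neg at hwin
    rw [PySem.List.pyRange_one_append 0 lo n hlo (by omega),
      PySem.List.pyRange_one_append lo (hi + 1) n (by omega) (by omega),
      List.countP_append, List.countP_append]
    have hc1 : (PySem.List.pyRange 0 lo 1).countP
        (fun i => q i && (decide (lo ≤ i) && decide (i ≤ hi))) = 0 := by
      apply List.countP_eq_zero.mpr
      intro i hi'
      have := PySem.List.mem_pyRange_one.mp hi'
      simp [show ¬ lo ≤ i by omega]
    have hc3 : (PySem.List.pyRange (hi + 1) n 1).countP
        (fun i => q i && (decide (lo ≤ i) && decide (i ≤ hi))) = 0 := by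
      apply List.countP_eq_zero.mpr
      intro i hi'
      have := PySem.List.mem_pyRange_one.mp hi'
      simp [show ¬ i ≤ hi by omega]
    have hc2 : (PySem.List.pyRange lo (hi + 1) 1).countP
        (fun i => q i && (decide (lo ≤ i) && decide (i ≤ hi)))
          = (PySem.List.pyRange lo (hi + 1) 1).countP q := by
      apply List.countP_congr
      intro i hi'
      have := PySem.List.mem_pyRange_one.mp hi'
      simp [show lo ≤ i by omega, show i ≤ hi by omega]
    rw [hc1, hc2, hc3]
    omega

lemma buildEvents_eq (ng : List Int) (n : Int) :
    buildEvents ng n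
      = (PySem.List.pyRange 0 n 1).map (fun i => (PySem.List.pyGetD ng i 0, i)) := by
  rw [buildEvents, PySem.List.foldl_append_singleton_eq_map]
  rfl

-- per-j: A's windowed event count equals B's direct window count
lemma countPW_eq_window (ng : List Int) (n : Int) (strict : Bool) (lof : Int → Int)
    (j : Int) (hlo : 0 ≤ lof j) (hj : j - 2 < n) :
    countPW (PySem.List.sorted (buildEvents ng n) (fun e => e.1) true) strict lof j
      = ((PySem.List.pyRange (lof j) (j - 1) 1).countP
          (fun i => cmpb strict j (PySem.List.pyGetD ng i 0)) : Int) := by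
  rw [countPW]
  rw [List.Perm.countP_eq _ (PySem.List.sorted_perm (buildEvents ng n) (fun e => e.1) true)]
  rw [buildEvents_eq, List.countP_map]
  have : (PySem.List.pyRange 0 n 1).countP
      ((fun e : Int × Int => cmpb strict j e.1 && (decide (lof j ≤ e.2) && decide (e.2 ≤ j - 2)))
        ∘ (fun i => (PySem.List.pyGetD ng i 0, i)))
      = (PySem.List.pyRange (lof j) (j - 2 + 1) 1).countP
          (fun i => cmpb strict j (PySem.List.pyGetD ng i 0)) :=
    countP_range_window (fun i => cmpb strict j (PySem.List.pyGetD ng i 0)) (lof j) (j - 2) n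
      hlo hj
  rw [this, show j - 2 + 1 = j - 1 by ring]

lemma jsN_eq_reverse (N : Nat) :
    (List.range N).map (fun k => (↑N - 1 - ↑k : Int))
      = (PySem.List.pyRange 0 ↑N 1).reverse := by
  rw [PySem.List.pyRange_zero_natCast, ← List.map_reverse]
  rw [show (List.range N).reverse = List.map (fun x => 0 + N - 1 - x) (List.range N) from by
    rw [List.range_eq_range', List.reverse_range', ← List.range_eq_range']]
  simp only [List.map_map]
  apply List.map_congr_left
  intro k hk
  have := List.mem_range.mp hk
  simp only [Function.comp_apply]
  omega

lemma sum_map_split' {α : Type} (l : List α) (f g : α → Int) :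
    (l.map (fun b => f b + g b)).sum = (l.map f).sum + (l.map g).sum := by
  induction l with
  | nil => simp
  | cons x xs ih => simp [ih]; ring

lemma sum_if_ge2 (f : Int → Int) (N : Nat) (h2 : 2 ≤ (N : Int)) :
    ((PySem.List.pyRange 0 ↑N 1).map (fun j => if 2 ≤ j then f j else 0)).sum
      = ((PySem.List.pyRange 2 ↑N 1).map f).sum := by
  rw [PySem.List.pyRange_one_append 0 2 ↑N (by omega) h2, List.map_append, List.sum_append]
  have h02 : PySem.List.pyRange 0 2 1 = [0, 1] := by decide
  rw [h02]
  have hmc : (PySem.List.pyRange 2 ↑N 1).map (fun j => if 2 ≤ j then f j else 0)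
      = (PySem.List.pyRange 2 ↑N 1).map f := by
    apply List.map_congr_left
    intro j hj
    have := PySem.List.mem_pyRange_one.mp hj
    rw [if_pos (by omega)]
  rw [hmc]
  norm_num


lemma foldl_count_ite (p : Int → Prop) [DecidablePred p] :
    ∀ (l : List Int) (a : Int),
    l.foldl (fun t i => if p i then t + 1 else t) a
      = a + (l.countP (fun i => decide (p i)) : Int) := by
  intro l
  induction l with
  | nil => intro a; simp
  | cons x l ih =>
    intro a
    rw [List.foldl_cons, List.countP_cons]
    by_cases h : p x
    · rw [if_pos h, ih]
      simp [h]
      push_cast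
      ring
    · rw [if_neg h, ih]
      simp [h]

lemma foldlB (ng pg : List Int) : ∀ (l : List Int) (acc : Int),
    l.foldl (fun total j =>
      let lb := PySem.List.pyGetD pg j 0
      let lo1 := if lb < 0 then 0 else lb
      let t1 := (PySem.List.pyRange lo1 (j - 1) 1).foldl
        (fun t i => if j < PySem.List.pyGetD ng i 0 then t + 1 else t) total
      (PySem.List.pyRange (lb + 1) (j - 1) 1).foldl
        (fun t i => if j ≤ PySem.List.pyGetD ng i 0 then t + 1 else t) t1) acc
    = acc + (l.map (fun j =>
        ((PySem.List.pyRange (if PySem.List.pyGetD pg j 0 < 0 then 0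
            else PySem.List.pyGetD pg j 0) (j - 1) 1).countP
          (fun i => decide (j < PySem.List.pyGetD ng i 0)) : Int)
        + ((PySem.List.pyRange (PySem.List.pyGetD pg j 0 + 1) (j - 1) 1).countP
          (fun i => decide (j ≤ PySem.List.pyGetD ng i 0)) : Int))).sum := by
  intro l
  induction l with
  | nil => intro acc; simp
  | cons j l ih =>
    intro acc
    rw [List.foldl_cons, ih]
    simp only [List.map_cons, List.sum_cons]
    rw [foldl_count_ite (fun i => j < PySem.List.pyGetD ng i 0),
      foldl_count_ite (fun i => j ≤ PySem.List.pyGetD ng i 0)]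
    push_cast
    ring

-- ===== VERDICT (by name: the statement is the Claim_ definition above) =====
theorem countPromotionalPeriods_spec : Claim_equal_countPromotionalPeriods := by
  unfold Claim_equal_countPromotionalPeriods
  intro orders _
  unfold Spec_countPromotionalPeriods
  simp only [countPromotionalPeriods, countPromotionalPeriods_alt]
  by_cases h3 : (orders.length : Int) < 3
  · rw [if_pos h3, if_pos h3]
  · rw [if_neg h3, if_neg h3]
    push_neg at h3
    set N := orders.length with hNdef
    have hNge : 3 ≤ (N : Int) := h3
    set ng := nextGreaterList orders ↑N with hngdef
    set pg := prevGreaterList orders ↑N with hpgdef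
    set events := PySem.List.sorted (buildEvents ng ↑N) (fun e => e.1) true with hevdef
    have hidx : ∀ e ∈ events, 0 ≤ e.2 ∧ e.2 < (N : Int) := by
      intro e he
      have hmem : e ∈ buildEvents ng ↑N :=
        ((PySem.List.sorted_perm (buildEvents ng ↑N) (fun e : Int × Int => e.1) true).mem_iff).mp
          (hevdef ▸ he)
      rw [buildEvents_eq] at hmem
      obtain ⟨i, hi, rfl⟩ := List.mem_map.mp hmem
      have := PySem.List.mem_pyRange_one.mp hi
      exact ⟨this.1, this.2⟩
    have hsort : List.Pairwise (fun a b : Int × Int => b.1 ≤ a.1) events :=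
      PySem.List.sorted_pairwise_rev (buildEvents ng ↑N) (fun e : Int × Int => e.1)
    have hpg : ∀ j : Int, -1 ≤ PySem.List.pyGetD pg j 0 := fun j => prevGreater_ge orders ↑N j
    have hclamp : ∀ j : Int,
        (if PySem.List.pyGetD pg j 0 = -1 then 0 else PySem.List.pyGetD pg j 0)
          = (if PySem.List.pyGetD pg j 0 < 0 then 0 else PySem.List.pyGetD pg j 0) := by
      intro j
      have := hpg j
      by_cases h : PySem.List.pyGetD pg j 0 = -1
      · rw [if_pos h, if_pos (by omega)]
      · rw [if_neg h, if_neg (by omega)]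
    have hlo1 : ∀ j : Int, 2 ≤ j →
        0 ≤ (if PySem.List.pyGetD pg j 0 = -1 then 0 else PySem.List.pyGetD pg j 0) := by
      intro j _
      have := hpg j
      by_cases h : PySem.List.pyGetD pg j 0 = -1
      · rw [if_pos h]
      · rw [if_neg h]; omega
    have hlo2 : ∀ j : Int, 2 ≤ j → 0 ≤ PySem.List.pyGetD pg j 0 + 1 := by
      intro j _
      have := hpg j
      omega
    have hfw0 : FWinv events N (List.replicate ((N : Int) + 1).toNat 0) 0 := by
      constructor
      · rw [List.length_replicate]; omega
      · intro c hc
        rw [show ((N : Int) + 1).toNat = N + 1 by omega, dsum_zeros]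
        simp
    have htake0 : ∀ e ∈ events.take 0, cmpb true ((N : Int) - 1) e.1 = true := by simp
    have htake0' : ∀ e ∈ events.take 0, cmpb false ((N : Int) - 1) e.1 = true := by simp
    have hA1 := sweepFold events true
      (fun j => if PySem.List.pyGetD pg j 0 = -1 then 0 else PySem.List.pyGetD pg j 0) N
      hidx hsort hlo1 N (List.replicate ((N : Int) + 1).toNat 0) 0 0 (le_refl N)
      (Nat.zero_le _) htake0 hfw0
    have hA2 := sweepFold events false
      (fun j => PySem.List.pyGetD pg j 0 + 1) N
      hidx hsort hlo2 N (List.replicate ((N : Int) + 1).toNat 0) 0 0 (le_refl N)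
      (Nat.zero_le _) htake0' hfw0
    rw [sweep1Step_eq events pg ↑N, sweep2Step_eq events pg ↑N, pyRange_desc N, hA1, hA2]
    rw [foldlB ng pg (PySem.List.pyRange 2 ↑N 1) 0]
    rw [jsN_eq_reverse N, List.map_reverse, List.sum_reverse, List.map_reverse,
      List.sum_reverse]
    rw [sum_if_ge2 _ N (by omega), sum_if_ge2 _ N (by omega)]
    have hpt : ∀ j ∈ PySem.List.pyRange 2 (↑N : Int) 1,
        (fun j => countPW events true
            (fun j => if PySem.List.pyGetD pg j 0 = -1 then 0 else PySem.List.pyGetD pg j 0) j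
          + countPW events false (fun j => PySem.List.pyGetD pg j 0 + 1) j) j
        = (fun j =>
            ((PySem.List.pyRange (if PySem.List.pyGetD pg j 0 < 0 then 0
                else PySem.List.pyGetD pg j 0) (j - 1) 1).countP
              (fun i => decide (j < PySem.List.pyGetD ng i 0)) : Int)
            + ((PySem.List.pyRange (PySem.List.pyGetD pg j 0 + 1) (j - 1) 1).countP
              (fun i => decide (j ≤ PySem.List.pyGetD ng i 0)) : Int)) j := by
      intro j hj
      have hjb := PySem.List.mem_pyRange_one.mp hj
      simp only []
      rw [countPW_eq_window ng ↑N true _ j (hlo1 j hjb.1) (by omega),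
        countPW_eq_window ng ↑N false _ j (hlo2 j hjb.1) (by omega)]
      rw [hclamp j]
      simp [cmpb]
    have key : ((PySem.List.pyRange 2 (↑N : Int) 1).map (countPW events true
          (fun j => if PySem.List.pyGetD pg j 0 = -1 then 0 else PySem.List.pyGetD pg j 0))).sum
        + ((PySem.List.pyRange 2 (↑N : Int) 1).map (countPW events false
          (fun j => PySem.List.pyGetD pg j 0 + 1))).sum
        = ((PySem.List.pyRange 2 (↑N : Int) 1).map (fun j =>
            ((PySem.List.pyRange (if PySem.List.pyGetD pg j 0 < 0 then 0
                else PySem.List.pyGetD pg j 0) (j - 1) 1).countP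
              (fun i => decide (j < PySem.List.pyGetD ng i 0)) : Int)
            + ((PySem.List.pyRange (PySem.List.pyGetD pg j 0 + 1) (j - 1) 1).countP
              (fun i => decide (j ≤ PySem.List.pyGetD ng i 0)) : Int))).sum := by
      rw [← sum_map_split', List.map_congr_left hpt]
    linarith [key]
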